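-- pv_equiv track=rewrite | github.com/fatighasemi74/pyhtonExamples | 1.py | multiples
-- ===== SOURCE A (Python) =====
-- def multiples(num):
--     list_n=[]
--     i = 1
--     sum = 0
--     while i < num:
--         if (i % 3 == 0) or (i % 5 == 0) :
--             sum = sum + i
--             list_n.append(sum)
--         i += 1
--     return list_n
-- ===== SOURCE B (Python) =====
-- def multiples(num):
--     # closed form: the cumulative sum at a qualifying value v is
--     # 3*T(v//3) + 5*T(v//5) - 15*T(v//15) with T(k) = k*(k+1)//2,
--     # i.e. inclusion-exclusion over multiples of 3 and 5 up to v;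
--     # so each output element is computed independently, with no running total.
--     def tri(k):
--         return k * (k + 1) // 2
--     def csum(v):
--         return 3 * tri(v // 3) + 5 * tri(v // 5) - 15 * tri(v // 15)
--     return [csum(i) for i in range(1, num) if i % 3 == 0 or i % 5 == 0]
-- ===== Notes on version B (the rewrite author's own statement) =====
-- stated objective: alternative
-- what changed: A maintains a running total while scanning; B computes each output element independently by the inclusion-exclusion closed form 3*T(v//3)+5*T(v//5)-15*T(v//15) for the sum of multiples of 3 or 5 up to v, so no accumulator is carried between iterations.
import Mathlib
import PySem

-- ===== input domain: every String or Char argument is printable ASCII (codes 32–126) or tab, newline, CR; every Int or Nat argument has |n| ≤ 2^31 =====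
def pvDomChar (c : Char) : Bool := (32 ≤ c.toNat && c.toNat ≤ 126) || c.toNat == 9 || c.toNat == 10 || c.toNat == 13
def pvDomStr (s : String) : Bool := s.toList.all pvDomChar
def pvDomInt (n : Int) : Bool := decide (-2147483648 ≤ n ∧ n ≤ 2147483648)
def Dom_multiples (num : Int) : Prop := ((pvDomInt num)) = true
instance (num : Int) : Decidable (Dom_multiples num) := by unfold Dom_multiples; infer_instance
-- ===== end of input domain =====

-- B replaces A's running total by the inclusion-exclusion closed form for the sum of
-- multiples of 3 or 5 up to v, computing each output element independently.

-- ===== PORT A =====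
-- A's while loop over i = 1 .. num-1 carrying (sum, list_n); list built by cons + final reverse.
def multiples (num : Int) : List Int :=
  ((PySem.List.pyRange 1 num 1).foldl
    (fun (st : Int × List Int) i =>
      if PySem.Int.mod i 3 == 0 || PySem.Int.mod i 5 == 0 then
        (st.1 + i, (st.1 + i) :: st.2)
      else st)
    (0, [])).2.reverse

-- ===== PORT B =====
-- tri(k) = k*(k+1)//2
def pvTri (k : Int) : Int := PySem.Int.floordiv (k * (k + 1)) 2
-- csum(v) = 3*tri(v//3) + 5*tri(v//5) - 15*tri(v//15)
def pvCsum (v : Int) : Int :=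
  3 * pvTri (PySem.Int.floordiv v 3) + 5 * pvTri (PySem.Int.floordiv v 5)
    - 15 * pvTri (PySem.Int.floordiv v 15)
def multiples_alt (num : Int) : List Int :=
  ((PySem.List.pyRange 1 num 1).filter
    (fun i => PySem.Int.mod i 3 == 0 || PySem.Int.mod i 5 == 0)).map pvCsum

-- ===== PRECONDITION & SPEC =====
def Spec_multiples (num : Int) (out : List Int) : Prop := out = multiples_alt num
instance (num : Int) (out : List Int) : Decidable (Spec_multiples num out) := by unfold Spec_multiples; infer_instance

-- ===== CLAIM (what is proved, stated in full; the proofs are below) =====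
def Claim_equal_multiples : Prop := ∀ (num : Int), Dom_multiples num → Spec_multiples num (multiples num)

-- ===== LEMMAS AND PROOFS =====

theorem pvTri_succ (k : Int) : pvTri (k + 1) = pvTri k + (k + 1) := by
  unfold pvTri
  rw [PySem.Int.floordiv_eq_ediv_of_pos (by norm_num),
      PySem.Int.floordiv_eq_ediv_of_pos (by norm_num)]
  have h : (k + 1) * (k + 1 + 1) = k * (k + 1) + (k + 1) * 2 := by ring
  rw [h, Int.add_mul_ediv_right _ _ (by norm_num)]

-- the closed form satisfies the loop's recurrence
theorem pvCsum_step (v : Int) :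
    pvCsum v = pvCsum (v - 1)
      + (if PySem.Int.mod v 3 == 0 || PySem.Int.mod v 5 == 0 then v else 0) := by
  unfold pvCsum
  simp only [PySem.Int.mod_eq_emod_of_pos (by norm_num : (0:Int) < 3),
      PySem.Int.mod_eq_emod_of_pos (by norm_num : (0:Int) < 5),
      PySem.Int.floordiv_eq_ediv_of_pos (by norm_num : (0:Int) < 3),
      PySem.Int.floordiv_eq_ediv_of_pos (by norm_num : (0:Int) < 5),
      PySem.Int.floordiv_eq_ediv_of_pos (by norm_num : (0:Int) < 15)]
  by_cases h3 : v % 3 = 0 <;> by_cases h5 : v % 5 = 0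
  · -- 3 ∣ v and 5 ∣ v, so 15 ∣ v
    have e3 : v / 3 = (v - 1) / 3 + 1 := by omega
    have e5 : v / 5 = (v - 1) / 5 + 1 := by omega
    have e15 : v / 15 = (v - 1) / 15 + 1 := by omega
    have m3 : 3 * (v / 3) = v := by omega
    have m5 : 5 * (v / 5) = v := by omega
    have m15 : 15 * (v / 15) = v := by omega
    simp only [h3, h5, e3, e5, e15, pvTri_succ]
    simp only [← e3, ← e5, ← e15]
    simp only [beq_self_eq_true, Bool.true_or, if_true]
    omega
  · have h15 : v % 15 ≠ 0 := by omega
    have e3 : v / 3 = (v - 1) / 3 + 1 := by omega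
    have e5 : v / 5 = (v - 1) / 5 := by omega
    have e15 : v / 15 = (v - 1) / 15 := by omega
    have m3 : 3 * (v / 3) = v := by omega
    simp only [e3, e5, e15, pvTri_succ]
    simp only [← e3]
    have hb : ((v % 3 == 0 || v % 5 == 0) = true) := by simp [h3]
    rw [if_pos hb]
    omega
  · have h15 : v % 15 ≠ 0 := by omega
    have e3 : v / 3 = (v - 1) / 3 := by omega
    have e5 : v / 5 = (v - 1) / 5 + 1 := by omega
    have e15 : v / 15 = (v - 1) / 15 := by omega
    have m5 : 5 * (v / 5) = v := by omega
    simp only [e3, e5, e15, pvTri_succ]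
    simp only [← e5]
    have hb : ((v % 3 == 0 || v % 5 == 0) = true) := by simp [h5]
    rw [if_pos hb]
    omega
  · have e3 : v / 3 = (v - 1) / 3 := by omega
    have e5 : v / 5 = (v - 1) / 5 := by omega
    have e15 : v / 15 = (v - 1) / 15 := by omega
    have hb : ¬ ((v % 3 == 0 || v % 5 == 0) = true) := by simp [h3, h5]
    rw [if_neg hb]
    simp only [e3, e5, e15]
    ring

-- loop invariant: with running sum pvCsum (a-1), the fold over [a, a+n) produces
-- the reversed map of pvCsum over the qualifying elements, on top of acc.
theorem multiples_loop (n : Nat) : ∀ (a : Int) (acc : List Int),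
    (((PySem.List.pyRange a (a + n) 1).foldl
      (fun (st : Int × List Int) i =>
        if PySem.Int.mod i 3 == 0 || PySem.Int.mod i 5 == 0 then
          (st.1 + i, (st.1 + i) :: st.2)
        else st)
      (pvCsum (a - 1), acc)).2)
    = (((PySem.List.pyRange a (a + n) 1).filter
        (fun i => PySem.Int.mod i 3 == 0 || PySem.Int.mod i 5 == 0)).map pvCsum).reverse
      ++ acc := by
  induction n with
  | zero =>
    intro a acc
    rw [PySem.List.pyRange_one_eq_nil (by omega)]
    simp
  | succ m ih =>
    intro a acc
    rw [PySem.List.pyRange_one_cons (by omega : a < a + (m + 1 : Nat))]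
    have key : pvCsum a = pvCsum (a - 1)
        + (if PySem.Int.mod a 3 == 0 || PySem.Int.mod a 5 == 0 then a else 0) :=
      pvCsum_step a
    have harg : a + (m + 1 : Nat) = (a + 1) + (m : Nat) := by push_cast; ring
    by_cases h : (PySem.Int.mod a 3 == 0 || PySem.Int.mod a 5 == 0) = true
    · simp only [List.foldl_cons, List.filter_cons]
      rw [if_pos h, if_pos h]
      have hsum : pvCsum (a - 1) + a = pvCsum ((a + 1) - 1) := by
        rw [if_pos h] at key; simp only [add_sub_cancel_right]; omega
      rw [hsum, harg, ih (a + 1) (pvCsum ((a+1) - 1) :: acc)]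
      have hback : pvCsum ((a + 1) - 1) = pvCsum a := by norm_num
      rw [hback]
      simp
    · simp only [List.foldl_cons, List.filter_cons]
      rw [if_neg h, if_neg h]
      have hsum : pvCsum (a - 1) = pvCsum ((a + 1) - 1) := by
        rw [if_neg h] at key; simp only [add_sub_cancel_right]; omega
      rw [hsum, harg, ih (a + 1) acc]

theorem pvCsum_zero : pvCsum 0 = 0 := by decide

theorem pyRange_one_norm (num : Int) :
    PySem.List.pyRange 1 num 1 = PySem.List.pyRange 1 (1 + ((num - 1).toNat : Int)) 1 := by
  by_cases h : num ≤ 1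
  · rw [PySem.List.pyRange_one_eq_nil h, PySem.List.pyRange_one_eq_nil (by omega)]
  · congr 1; omega

-- ===== VERDICT (by name: the statement is the Claim_ definition above) =====
theorem multiples_spec : Claim_equal_multiples := by
  intro num _
  unfold Spec_multiples multiples multiples_alt
  rw [pyRange_one_norm num]
  conv_lhs => rw [show ((0 : Int), ([] : List Int)) = (pvCsum ((1:Int) - 1), ([] : List Int)) from by
    norm_num [pvCsum_zero]]
  rw [multiples_loop ((num - 1).toNat) 1 []]
  simp
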